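-- pv_equiv track=rewrite | github.com/matthewdholtkamp/testfile | scripts/post_extraction_analysis.py | build_source_map
-- ===== SOURCE A (Python) =====
-- def build_source_map(rows):
--     source_rows = [
--         row for row in rows
--         if row.get('pmid') and not (row.get('full_path') or '').startswith('extraction_outputs/')
--     ]
--     source_map = {}
--     for row in source_rows:
--         pmid = row['pmid']
--         current = source_map.get(pmid)
--         if current is None or (row.get('modified_time', '') or '') > (current.get('modified_time', '') or ''):
--             source_map[pmid] = row
--     return source_map
-- ===== SOURCE B (Python) =====
-- def build_source_map(rows):
--     source_rows = [
--         row for row in rows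
--         if row.get('pmid') and not (row.get('full_path') or '').startswith('extraction_outputs/')
--     ]
--     groups = {}
--     for row in source_rows:
--         groups.setdefault(row['pmid'], []).append(row)
--     return {
--         pmid: max(group, key=lambda r: r.get('modified_time', '') or '')
--         for pmid, group in groups.items()
--     }
-- ===== Notes on version B (the rewrite author's own statement) =====
-- stated objective: alternative
-- what changed: A interleaves selection with deduplication in one dict-update loop; B decomposes the task into grouping the filtered rows by pmid and then picking each group's max by modified_time (max's first-maximal rule preserving A's first-wins ties).
import Mathlib
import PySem

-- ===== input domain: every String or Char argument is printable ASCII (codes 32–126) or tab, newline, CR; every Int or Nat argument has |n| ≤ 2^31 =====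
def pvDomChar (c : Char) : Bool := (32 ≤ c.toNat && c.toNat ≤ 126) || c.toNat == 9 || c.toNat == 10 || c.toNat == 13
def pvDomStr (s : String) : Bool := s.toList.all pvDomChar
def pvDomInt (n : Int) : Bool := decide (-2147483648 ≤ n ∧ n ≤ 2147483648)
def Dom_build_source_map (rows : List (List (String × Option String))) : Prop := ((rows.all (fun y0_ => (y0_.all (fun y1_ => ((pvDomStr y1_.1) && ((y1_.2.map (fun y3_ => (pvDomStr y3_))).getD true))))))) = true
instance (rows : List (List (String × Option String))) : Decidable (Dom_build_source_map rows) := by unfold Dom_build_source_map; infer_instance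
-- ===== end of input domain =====

-- B replaces A's single dict-update loop by group-by-pmid then per-group max; same filter, same first-wins ties ("alternative" objective, not claimed faster).

-- helpers shared by both ports (the two Pythons contain these expressions verbatim)
-- row.get(k): first-match lookup in the association list (exact for the Python dict)
def pvRowGet (row : List (String × Option String)) (k : String) : Option (Option String) :=
  (PySem.Dict.mk row).get? k

-- `(x or '')` applied to the result of .get: None / missing → ''
def pvOrEmpty (o : Option (Option String)) : String :=
  match o with
  | some (some s) => s
  | _ => ""

-- Python truthiness of row.get(k) for an Optional[str] value
def pvTruthy (o : Option (Option String)) : Bool :=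
  match o with
  | some (some s) => s != ""
  | _ => false

-- the comprehension's filter predicate
def pvKeep (row : List (String × Option String)) : Bool :=
  pvTruthy (pvRowGet row "pmid") &&
    !(PySem.Str.startswith (pvOrEmpty (pvRowGet row "full_path")) "extraction_outputs/")

-- row['pmid']; both programs only evaluate it on filtered rows, where it is a non-empty string
def pvPmid (row : List (String × Option String)) : String :=
  pvOrEmpty (pvRowGet row "pmid")

-- (row.get('modified_time', '') or '')
def pvMTime (row : List (String × Option String)) : String :=
  pvOrEmpty (pvRowGet row "modified_time")

-- ===== PORT A =====
def build_source_map (rows : List (List (String × Option String))) : List (String × List (String × Option String)) :=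
  let source_rows := rows.filter pvKeep
  let source_map :=
    source_rows.foldl
      (fun source_map row =>
        let pmid := pvPmid row
        match source_map.get? pmid with        -- current = source_map.get(pmid)
        | none => source_map.insert pmid row   -- current is None
        | some current =>
            if pvMTime current < pvMTime row   -- row's time > current's time
            then source_map.insert pmid row
            else source_map)
      (PySem.Dict.empty)
  source_map.items

-- ===== PORT B =====
def build_source_map_alt (rows : List (List (String × Option String))) : List (String × List (String × Option String)) :=
  let source_rows := rows.filter pvKeep
  let groups :=
    source_rows.foldl
      (fun groups row => groups.modify (pvPmid row) [] (fun grp => grp ++ [row]))  -- setdefault(...,[]).append(row)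
      (PySem.Dict.empty)
  groups.items.map (fun pg => (pg.1, PySem.List.maxD pg.2 pvMTime []))  -- max(group, key=...); groups are nonempty so the default [] is never used

-- ===== PRECONDITION & SPEC =====
def Spec_build_source_map (rows : List (List (String × Option String))) (out : List (String × List (String × Option String))) : Prop := out = build_source_map_alt rows
instance (rows : List (List (String × Option String))) (out : List (String × List (String × Option String))) : Decidable (Spec_build_source_map rows out) := by unfold Spec_build_source_map; infer_instance

-- ===== CLAIM (what is proved, stated in full; the proofs are below) =====
def Claim_equal_build_source_map : Prop := ∀ (rows : List (List (String × Option String))), Dom_build_source_map rows → Spec_build_source_map rows (build_source_map rows)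

-- ===== LEMMAS AND PROOFS =====

-- A's loop body, named for the proofs
def pvStepA (sm : PySem.Dict String (List (String × Option String))) (row : List (String × Option String)) : PySem.Dict String (List (String × Option String)) :=
  match sm.get? (pvPmid row) with
  | none => sm.insert (pvPmid row) row
  | some current =>
      if pvMTime current < pvMTime row then sm.insert (pvPmid row) row else sm

lemma buildA_eq (rows : List (List (String × Option String))) :
    build_source_map rows = ((rows.filter pvKeep).foldl pvStepA PySem.Dict.empty).items := rfl

lemma stepA_get? (sm : PySem.Dict String (List (String × Option String)))
    (r : List (String × Option String)) (k : String) :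
    (pvStepA sm r).get? k =
      if pvPmid r = k then
        (match sm.get? k with
         | none => some r
         | some c => if pvMTime c < pvMTime r then some r else some c)
      else sm.get? k := by
  cases hc : sm.get? (pvPmid r) with
  | none =>
      by_cases h : pvPmid r = k
      · subst h; simp [pvStepA, hc]
      · simp [pvStepA, hc, h, PySem.Dict.get?_insert, Ne.symm h]
  | some c =>
      by_cases h : pvPmid r = k
      · subst h
        simp only [pvStepA, hc]
        split_ifs with hlt <;> simp [hc]
      · simp only [pvStepA, hc, if_neg h]
        split_ifs with hlt
        · simp [PySem.Dict.get?_insert, Ne.symm h]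
        · rfl

lemma foldA_get? (l : List (List (String × Option String)))
    (sm : PySem.Dict String (List (String × Option String))) (k : String) :
    (l.foldl pvStepA sm).get? k =
      (l.filter (fun r => pvPmid r == k)).foldl
        (fun acc r =>
          match acc with
          | none => some r
          | some c => if pvMTime c < pvMTime r then some r else some c)
        (sm.get? k) := by
  induction l generalizing sm with
  | nil => simp
  | cons r t ih =>
      simp only [List.foldl_cons, List.filter_cons]
      rw [ih, stepA_get?]
      by_cases h : pvPmid r = k
      · have hb : (pvPmid r == k) = true := by simp [h]
        simp only [hb, if_pos h, if_true, List.foldl_cons]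
      · have hb : (pvPmid r == k) = false := by simp [h]
        simp only [hb, if_neg h, Bool.false_eq_true, if_false]

lemma stepA_keys (sm : PySem.Dict String (List (String × Option String)))
    (r : List (String × Option String)) :
    (pvStepA sm r).keys = PySem.Set.add sm.keys (pvPmid r) := by
  cases hc : sm.get? (pvPmid r) with
  | none =>
      have hcont : sm.contains (pvPmid r) = false := by
        rw [PySem.Dict.contains_eq_isSome_get?, hc]; rfl
      have hmem : pvPmid r ∉ sm.keys := by
        rw [PySem.Dict.contains_eq_decide_mem_keys] at hcont
        simpa using hcont
      simp only [pvStepA, hc]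
      rw [PySem.Dict.keys_insert_of_not_contains _ _ hcont]
      simp [PySem.Set.add, hmem]
  | some c =>
      have hcont : sm.contains (pvPmid r) = true := by
        rw [PySem.Dict.contains_eq_isSome_get?, hc]; rfl
      have hmem : pvPmid r ∈ sm.keys := by
        rw [PySem.Dict.contains_eq_decide_mem_keys] at hcont
        simpa using hcont
      have hadd : PySem.Set.add sm.keys (pvPmid r) = sm.keys := by
        simp [PySem.Set.add, hmem]
      simp only [pvStepA, hc]
      split_ifs with hlt
      · rw [PySem.Dict.keys_insert_of_contains _ _ hcont, hadd]
      · rw [hadd]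

lemma foldA_keys (l : List (List (String × Option String)))
    (sm : PySem.Dict String (List (String × Option String))) :
    (l.foldl pvStepA sm).keys = PySem.Set.update sm.keys (l.map pvPmid) := by
  induction l generalizing sm with
  | nil => rfl
  | cons r t ih =>
      have hupd : ∀ (s : PySem.Set String) (x : String) (xs : List String),
          PySem.Set.update s (x :: xs) = PySem.Set.update (PySem.Set.add s x) xs := by
        intro s x xs; simp [PySem.Set.update]
      simp only [List.foldl_cons, List.map_cons]
      rw [ih, stepA_keys, hupd]

-- B's grouping fold, as lookup and keys
lemma foldB_getD (l : List (List (String × Option String))) (k : String) :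
    ((l.foldl (fun groups row => groups.modify (pvPmid row) [] (fun grp => grp ++ [row])) (PySem.Dict.empty : PySem.Dict String (List (List (String × Option String))))).getD k []) =
      l.filter (fun r => pvPmid r == k) := by
  have h := PySem.Dict.getD_foldl_modify_append (l.map (fun r => (pvPmid r, r)))
    (PySem.Dict.empty : PySem.Dict String (List (List (String × Option String)))) k
  rw [List.foldl_map] at h
  simpa [List.filter_map, Function.comp_def, List.map_map] using h

-- ===== VERDICT (by name: the statement is the Claim_ definition above) =====
theorem build_source_map_spec : Claim_equal_build_source_map := by
  intro rows _
  unfold Spec_build_source_map build_source_map_alt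
  rw [buildA_eq]
  simp only []
  have hndB : ((rows.filter pvKeep).foldl
      (fun groups row => groups.modify (pvPmid row) [] (fun grp => grp ++ [row]))
      (PySem.Dict.empty : PySem.Dict String (List (List (String × Option String))))).keys.Nodup := by
    exact PySem.Dict.nodup_keys_foldl_modify_key (rows.filter pvKeep) pvPmid []
      (fun _ r grp => grp ++ [r]) PySem.Dict.empty (by simp)
  have hkB : ((rows.filter pvKeep).foldl
      (fun groups row => groups.modify (pvPmid row) [] (fun grp => grp ++ [row]))
      (PySem.Dict.empty : PySem.Dict String (List (List (String × Option String))))).keys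
      = PySem.Set.update (PySem.Dict.empty : PySem.Dict String (List (List (String × Option String)))).keys ((rows.filter pvKeep).map pvPmid) := by
    exact PySem.Dict.keys_foldl_modify_key (rows.filter pvKeep) pvPmid []
      (fun _ r grp => grp ++ [r]) PySem.Dict.empty
  have hkA := foldA_keys (rows.filter pvKeep) PySem.Dict.empty
  have hk : ((rows.filter pvKeep).foldl pvStepA PySem.Dict.empty).keys
      = ((rows.filter pvKeep).foldl
          (fun groups row => groups.modify (pvPmid row) [] (fun grp => grp ++ [row]))
          (PySem.Dict.empty : PySem.Dict String (List (List (String × Option String))))).keys := by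
    exact hkA.trans hkB.symm
  have hndA : ((rows.filter pvKeep).foldl pvStepA PySem.Dict.empty).keys.Nodup := by
    rw [hk]; exact hndB
  rw [PySem.Dict.items_eq_map_keys _ hndA [], PySem.Dict.items_eq_map_keys _ hndB [], List.map_map, hk]
  apply List.map_congr_left
  intro k _
  have hm : ((rows.filter pvKeep).foldl pvStepA PySem.Dict.empty).get? k
      = PySem.List.max? ((rows.filter pvKeep).filter (fun r => pvPmid r == k)) pvMTime := by
    rw [foldA_get?, PySem.Dict.get?_empty]
    unfold PySem.List.max?
    congr 1
    funext acc r
    cases acc with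
    | none => rfl
    | some c => by_cases hlt : pvMTime c < pvMTime r <;> simp [hlt]
  have hg := foldB_getD (rows.filter pvKeep) k
  simp only [Function.comp_def]
  rw [PySem.Dict.getD_eq_get?_getD, hm, hg]
  simp only [PySem.List.maxD]
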